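-- pv_equiv track=rewrite | github.com/silvercloud1442/bimbimbambam | finder.py | count_kotls
-- ===== SOURCE A (Python) =====
-- def count_kotls(glass):
--     # kotls = 0
--     # l_c = 0
--     # m_c = 0
--     # r_c = 0
--     # for row in glass:
--     #     s_row = ''.join(map(str, row))
--     #     if s_row[:2] == '01' or s_row[:2] == '02':
--     #         l_c += 1
--     #         if l_c == 3:
--     #             l_c = 0
--     #             kotls += 1
--     #     else:
--     #         l_c = 0
--     #     if '101' in s_row or '202' in s_row:
--     #         m_c += 1
--     #         if m_c == 3:
--     #             m_c = 0
--     #             kotls += 1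
--     #     else:
--     #         m_c = 0
--     #     if s_row[:2] == '10' or s_row[:2] == '20':
--     #         r_c += 1
--     #         if r_c == 3:
--     #             r_c = 0
--     #             kotls += 1
--     #     else:
--     #         r_c = 0
--     # return kotls
--     count = 0
--     for col in range(len(glass[0])):
--         for row in range(len(glass) - 3):  # Ensure at least 4 rows left
--             if all(glass[row + i][col] == 0 for i in range(4)):
--                 # Check if the column is surrounded by '1' or the edge
--                 if (col == 0 or all(glass[row + i][col - 1] == 1 for i in range(4))) and \
--                         (col == len(glass[0]) - 1 or all(glass[row + i][col + 1] == 1 for i in range(4))):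
--                     count += 1
--     return count
-- ===== SOURCE B (Python) =====
-- def count_kotls(glass):
--     n_cols = len(glass[0])
--     n_rows = len(glass)
--     # run-length tables, one bottom-up sweep:
--     # zeros[r][c] = consecutive 0-cells downward from (r, c),
--     # ones[r][c]  = consecutive 1-cells downward from (r, c).
--     zeros, ones = [], []
--     prev_z = [0] * n_cols
--     prev_o = [0] * n_cols
--     for row in reversed(glass):
--         prev_z = [p + 1 if x == 0 else 0 for x, p in zip(row, prev_z)]
--         prev_o = [p + 1 if x == 1 else 0 for x, p in zip(row, prev_o)]
--         zeros.append(prev_z)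
--         ones.append(prev_o)
--     zeros.reverse()
--     ones.reverse()
--     count = 0
--     for col in range(n_cols):
--         for row in range(n_rows - 3):
--             if zeros[row][col] >= 4 and \
--                     (col == 0 or ones[row][col - 1] >= 4) and \
--                     (col == n_cols - 1 or ones[row][col + 1] >= 4):
--                 count += 1
--     return count
-- ===== Notes on version B (the rewrite author's own statement) =====
-- stated objective: faster
-- what changed: B precomputes two run-length tables (consecutive zeros / consecutive ones downward per column) in one bottom-up sweep and replaces every inner range(4) generator scan of A by a single table threshold test zeros[r][c] >= 4 / ones[r][c+-1] >= 4.
-- outside the precondition, e.g. on count_kotls([[1, 1], [1], [1, 1], [1, 1]]): A returns 0, B raises IndexError; on count_kotls([[7, 7], [7, 7], [7, 7], [7, 7], [7]]): A returns 0, B raises IndexError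
import Mathlib
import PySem

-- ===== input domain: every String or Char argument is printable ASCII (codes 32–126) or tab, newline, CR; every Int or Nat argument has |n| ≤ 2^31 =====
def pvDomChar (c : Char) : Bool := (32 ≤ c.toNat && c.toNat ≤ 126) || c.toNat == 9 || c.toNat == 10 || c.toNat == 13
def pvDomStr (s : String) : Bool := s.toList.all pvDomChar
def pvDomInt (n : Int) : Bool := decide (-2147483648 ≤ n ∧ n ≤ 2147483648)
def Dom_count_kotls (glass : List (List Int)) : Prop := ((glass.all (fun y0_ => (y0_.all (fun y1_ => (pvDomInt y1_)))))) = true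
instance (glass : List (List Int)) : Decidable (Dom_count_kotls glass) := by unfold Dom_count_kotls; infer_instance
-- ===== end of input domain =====

-- B replaces A's repeated range(4) column scans by two run-length tables built in one
-- bottom-up sweep, testing each window with O(1) comparisons (measured faster by a constant factor).


-- ===== PORT A =====
def count_kotls (glass : List (List Int)) : Int :=
  let w : Int := (PySem.List.pyGetD glass 0 ([] : List Int)).length
  (PySem.List.pyRange 0 w 1).foldl (fun count col =>
    (PySem.List.pyRange 0 ((glass.length : Int) - 3) 1).foldl (fun count row =>
      if (PySem.List.pyRange 0 4 1).all (fun i =>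
            PySem.List.pyGetD (PySem.List.pyGetD glass (row + i) []) col 0 == 0) then
        if ((col == 0 || (PySem.List.pyRange 0 4 1).all (fun i =>
                PySem.List.pyGetD (PySem.List.pyGetD glass (row + i) []) (col - 1) 0 == 1))
            && (col == w - 1 || (PySem.List.pyRange 0 4 1).all (fun i =>
                PySem.List.pyGetD (PySem.List.pyGetD glass (row + i) []) (col + 1) 0 == 1))) then
          count + 1
        else count
      else count) count) 0

-- ===== PORT B =====
def count_kotls_alt (glass : List (List Int)) : Int :=
  let nCols : Nat := (PySem.List.pyGetD glass 0 ([] : List Int)).length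
  let nRows : Nat := glass.length
  let st := glass.reverse.foldl
    (fun (s : List Int × List Int × List (List Int) × List (List Int)) row =>
      let pz := (row.zip s.1).map (fun xp => if xp.1 == 0 then xp.2 + 1 else 0)
      let po := (row.zip s.2.1).map (fun xp => if xp.1 == 1 then xp.2 + 1 else 0)
      (pz, po, s.2.2.1 ++ [pz], s.2.2.2 ++ [po]))
    (List.replicate nCols (0 : Int), List.replicate nCols (0 : Int),
      ([] : List (List Int)), ([] : List (List Int)))
  let zeros := st.2.2.1.reverse
  let ones := st.2.2.2.reverse
  (PySem.List.pyRange 0 (nCols : Int) 1).foldl (fun count col =>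
    (PySem.List.pyRange 0 ((nRows : Int) - 3) 1).foldl (fun count row =>
      if (decide (4 ≤ PySem.List.pyGetD (PySem.List.pyGetD zeros row []) col 0)
          && (col == 0 || decide (4 ≤ PySem.List.pyGetD (PySem.List.pyGetD ones row []) (col - 1) 0))
          && (col == (nCols : Int) - 1 || decide (4 ≤ PySem.List.pyGetD (PySem.List.pyGetD ones row []) (col + 1) 0))) then
        count + 1
      else count) count) 0

-- ===== PRECONDITION & SPEC =====
-- Pre_ excludes the empty grid, on which A raises IndexError (glass[0]), and grids with at
-- least 4 rows in which some row is shorter than the first row: there A usually raises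
-- IndexError and, on the few shapes where its short-circuiting all() lets it return 0,
-- B's table construction naturally raises IndexError.
def Pre_count_kotls (glass : List (List Int)) : Prop :=
  glass ≠ [] ∧ (4 ≤ glass.length → ∀ row ∈ glass, (glass.headD []).length ≤ row.length)
instance (glass : List (List Int)) : Decidable (Pre_count_kotls glass) := by
  unfold Pre_count_kotls; infer_instance
def pvWitness_count_kotls : List (List Int) := [[0], [0], [0], [0]]
def Spec_count_kotls (glass : List (List Int)) (out : Int) : Prop := out = count_kotls_alt glass
instance (glass : List (List Int)) (out : Int) : Decidable (Spec_count_kotls glass out) := by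
  unfold Spec_count_kotls; infer_instance

-- ===== CLAIM (what is proved, stated in full; the proofs are below) =====
def Claim_equal_count_kotls : Prop := ∀ (glass : List (List Int)), Dom_count_kotls glass → Pre_count_kotls glass → Spec_count_kotls glass (count_kotls glass)

-- ===== LEMMAS AND PROOFS =====

-- downward run length of value t in column c, over the rows of g (Nat-indexed, spec side)
def runL (t : Int) (c : Nat) : List (List Int) → Int
  | [] => 0
  | row :: rest => if row.getD c 0 = t then runL t c rest + 1 else 0

-- the prev_z / prev_o vector B's sweep holds after processing g (bottom-up)
def pzF (t : Int) (nc : Nat) : List (List Int) → List Int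
  | [] => List.replicate nc 0
  | row :: rest => (row.zip (pzF t nc rest)).map (fun xp => if xp.1 == t then xp.2 + 1 else 0)

-- the finished (already re-reversed) table B indexes in its counting loop
def rowsF (t : Int) (nc : Nat) : List (List Int) → List (List Int)
  | [] => []
  | row :: rest => pzF t nc (row :: rest) :: rowsF t nc rest

lemma fold_eq (nc : Nat) (glass : List (List Int)) :
    glass.reverse.foldl
      (fun (s : List Int × List Int × List (List Int) × List (List Int)) row =>
        let pz := (row.zip s.1).map (fun xp => if xp.1 == 0 then xp.2 + 1 else 0)
        let po := (row.zip s.2.1).map (fun xp => if xp.1 == 1 then xp.2 + 1 else 0)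
        (pz, po, s.2.2.1 ++ [pz], s.2.2.2 ++ [po]))
      (List.replicate nc (0 : Int), List.replicate nc (0 : Int),
        ([] : List (List Int)), ([] : List (List Int)))
    = (pzF 0 nc glass, pzF 1 nc glass, (rowsF 0 nc glass).reverse, (rowsF 1 nc glass).reverse) := by
  rw [List.foldl_reverse]
  induction glass with
  | nil => simp [pzF, rowsF]
  | cons row rest ih => rw [List.foldr_cons, ih]; simp [pzF, rowsF]

lemma rowsF_getD (t : Int) (nc : Nat) (g : List (List Int)) (r : Nat) (hr : r < g.length) :
    (rowsF t nc g).getD r [] = pzF t nc (g.drop r) := by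
  induction g generalizing r with
  | nil => simp at hr
  | cons row rest ih =>
    cases r with
    | zero => simp [rowsF]
    | succ r => simpa [rowsF] using ih r (by simpa using hr)

lemma pzF_length (t : Int) (nc : Nat) (g : List (List Int))
    (hrect : ∀ row ∈ g, nc ≤ row.length) : (pzF t nc g).length = nc := by
  induction g with
  | nil => simp [pzF]
  | cons row rest ih =>
    have h1 : nc ≤ row.length := hrect row (by simp)
    have h2 := ih (fun r hr => hrect r (by simp [hr]))
    simp [pzF, h2]; omega

lemma pzF_getD (t : Int) (nc : Nat) (g : List (List Int))
    (hrect : ∀ row ∈ g, nc ≤ row.length) (c : Nat) (hc : c < nc) :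
    (pzF t nc g).getD c 0 = runL t c g := by
  induction g with
  | nil => simp [pzF, runL]
  | cons row rest ih =>
    have h1 : nc ≤ row.length := hrect row (by simp)
    have hrest : ∀ r ∈ rest, nc ≤ r.length := fun r hr => hrect r (by simp [hr])
    have h2 : (pzF t nc rest).length = nc := pzF_length t nc rest hrest
    have hz : c < (row.zip (pzF t nc rest)).length := by
      simp [List.length_zip, h2]; omega
    rw [pzF, runL, List.getD_eq_getElem?_getD, List.getElem?_eq_getElem (by simpa using hz)]
    simp only [List.getElem_map, List.getElem_zip, Option.getD_some]
    rw [← ih hrest, List.getD_eq_getElem?_getD (l := pzF t nc rest),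
        List.getElem?_eq_getElem (by omega)]
    have hrow : row.getD c 0 = row[c]'(by omega) := by
      rw [List.getD_eq_getElem?_getD, List.getElem?_eq_getElem (by omega)]; rfl
    rw [hrow]
    by_cases h : row[c]'(by omega) = t <;> simp [h]

lemma runL_nonneg (t : Int) (c : Nat) (g : List (List Int)) : 0 ≤ runL t c g := by
  induction g with
  | nil => simp [runL]
  | cons row rest ih => rw [runL]; split <;> omega

lemma runL_ge_four (t : Int) (c : Nat) (a b d e : List Int) (rest : List (List Int)) :
    (4 ≤ runL t c (a :: b :: d :: e :: rest)) ↔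
      (a.getD c 0 = t ∧ b.getD c 0 = t ∧ d.getD c 0 = t ∧ e.getD c 0 = t) := by
  have h0 := runL_nonneg t c rest
  simp only [runL]
  split_ifs with h1 h2 h3 h4 <;> (simp_all; try omega)

-- table test ⟺ A's four-cell scan, at valid Nat coordinates
lemma table_test (t : Int) (nc : Nat) (glass : List (List Int))
    (hrect : ∀ row ∈ glass, nc ≤ row.length) (r c : Nat)
    (hr : r + 3 < glass.length) (hc : c < nc) :
    (4 ≤ ((rowsF t nc glass).getD r []).getD c 0) ↔
      ((glass.getD r []).getD c 0 = t ∧ (glass.getD (r+1) []).getD c 0 = t ∧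
       (glass.getD (r+2) []).getD c 0 = t ∧ (glass.getD (r+3) []).getD c 0 = t) := by
  have hr0 : r < glass.length := by omega
  rw [rowsF_getD t nc glass r hr0,
      pzF_getD t nc (glass.drop r) (fun row hrow => hrect row (List.mem_of_mem_drop hrow)) c hc]
  rw [List.drop_eq_getElem_cons hr0, List.drop_eq_getElem_cons (show r+1 < glass.length by omega),
      List.drop_eq_getElem_cons (show r+2 < glass.length by omega),
      List.drop_eq_getElem_cons (show r+3 < glass.length by omega)]
  rw [runL_ge_four]
  have hg : ∀ (k : Nat) (hk : k < glass.length), glass.getD k [] = glass[k] := by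
    intro k hk
    rw [List.getD_eq_getElem?_getD, List.getElem?_eq_getElem hk]; rfl
  rw [hg r hr0, hg (r+1) (by omega), hg (r+2) (by omega), hg (r+3) (by omega)]

lemma table_testB (t : Int) {nc : Nat} {glass : List (List Int)}
    (hrect : ∀ row ∈ glass, nc ≤ row.length) (r c : Nat)
    (hr : r + 3 < glass.length) (hc : c < nc) :
    decide (4 ≤ ((rowsF t nc glass).getD r []).getD c 0)
      = (((glass.getD r []).getD c 0 == t) && (((glass.getD (r+1) []).getD c 0 == t) &&
         (((glass.getD (r+2) []).getD c 0 == t) && ((glass.getD (r+3) []).getD c 0 == t)))) := by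
  rw [Bool.eq_iff_iff]
  simp only [decide_eq_true_eq, Bool.and_eq_true, beq_iff_eq]
  exact table_test t nc glass hrect r c hr hc

lemma if_shape (z l rr : Bool) (a : Int) :
    (if z = true then (if (l && rr) = true then a + 1 else a) else a)
      = (if (z && l && rr) = true then a + 1 else a) := by
  cases z <;> cases l <;> cases rr <;> simp

-- ===== VERDICT (by name: the statement is the Claim_ definition above) =====
theorem count_kotls_spec : Claim_equal_count_kotls := by
  intro glass _ hpre
  obtain ⟨hne, hrectH⟩ := hpre
  unfold Spec_count_kotls
  cases glass with
  | nil => exact absurd rfl hne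
  | cons g0 gs =>
  simp only [count_kotls, count_kotls_alt, fold_eq, List.reverse_reverse,
    PySem.List.pyGetD_zero, List.getD_cons_zero]
  apply PySem.List.foldl_congr_mem
  intro acc col hcol
  apply PySem.List.foldl_congr_mem
  intro acc2 rowi hrow
  rw [PySem.List.mem_pyRange_one] at hcol hrow
  obtain ⟨r, rfl⟩ : ∃ r : Nat, rowi = (r : Int) := ⟨rowi.toNat, (Int.toNat_of_nonneg hrow.1).symm⟩
  obtain ⟨c, rfl⟩ : ∃ c : Nat, col = (c : Int) := ⟨col.toNat, (Int.toNat_of_nonneg hcol.1).symm⟩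
  have hr3 : r + 3 < (g0 :: gs).length := by
    have := hrow.2; simp at this ⊢; omega
  have hcn : c < g0.length := by exact_mod_cast hcol.2
  have hrect : ∀ row ∈ (g0 :: gs), g0.length ≤ row.length := by
    intro row hm
    simpa using hrectH (by simp at hr3 ⊢; omega) row hm
  have h4 : PySem.List.pyRange 0 4 1 = [0, 1, 2, 3] := by decide
  have e1 : ((r : Int) + 1) = ((r + 1 : Nat) : Int) := by push_cast; ring
  have e2 : ((r : Int) + 2) = ((r + 2 : Nat) : Int) := by push_cast; ring
  have e3 : ((r : Int) + 3) = ((r + 3 : Nat) : Int) := by push_cast; ring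
  rw [h4]
  simp only [List.all_cons, List.all_nil, Bool.and_true, add_zero, e1, e2, e3,
    PySem.List.pyGetD_natCast]
  rw [table_testB 0 hrect r c hr3 hcn]
  by_cases hc0 : c = 0
  · subst hc0
    have ht1 : (((0:Nat):Int) == 0) = true := by simp
    by_cases hce : ((0:Nat) : Int) = (g0.length : Int) - 1
    · have ht2 : (((0:Nat):Int) == (g0.length:Int) - 1) = true := by simpa using hce
      simp only [ht1, ht2, Bool.true_or]
      rw [if_shape]
    · have hf2 : (((0:Nat):Int) == (g0.length:Int) - 1) = false := by simpa using hce
      have e5 : (((0:Nat):Int) + 1) = (((0+1:Nat)) : Int) := by push_cast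
      simp only [ht1, Bool.true_or, hf2, Bool.false_or, e5, PySem.List.pyGetD_natCast]
      rw [table_testB 1 hrect r (0+1) hr3 (by simp at hcn ⊢; omega)]
      rw [if_shape]
  · have hf1 : ((c:Int) == 0) = false := by simp [hc0]
    have e4 : ((c : Int) - 1) = (((c - 1 : Nat)) : Int) := by omega
    by_cases hce : (c : Int) = (g0.length : Int) - 1
    · have ht2 : ((c:Int) == (g0.length:Int) - 1) = true := by simp [hce]
      simp only [hf1, Bool.false_or, ht2, Bool.true_or, e4, PySem.List.pyGetD_natCast]
      rw [table_testB 1 hrect r (c-1) hr3 (by omega)]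
      rw [if_shape]
    · have ht2 : ((c:Int) == (g0.length:Int) - 1) = false := by simp [hce]
      have e5 : ((c:Int) + 1) = (((c+1:Nat)) : Int) := by push_cast; ring
      simp only [hf1, ht2, Bool.false_or, e4, e5, PySem.List.pyGetD_natCast]
      rw [table_testB 1 hrect r (c-1) hr3 (by omega),
          table_testB 1 hrect r (c+1) hr3 (by omega)]
      rw [if_shape]
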